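-- pv_equiv track=rewrite | github.com/mishrapratyush/AzureSpeechTools | src/tools/transcripts/text_tools.py | find_repetition
-- ===== SOURCE A (Python) =====
-- def find_repetition(input_str):
--     """
--     Removes repetitions from string. Optionally specify minimum number
--     of repetitions to keep before removing the rest
--     :param input_str: String to be processed.
--     :return: string with repetitions removed
--     """
--     lines = input_str.split('\n')
--     duplicates = []
--     for line_index,line in enumerate(lines):
--         split_line = line.split(' ')
--
--         # one-word repetition
--         for index in range(len(split_line) - 1):
--             curr = split_line[index]
--             next_line = split_line[index+1]
--             if curr == next_line:
--                 duplicates.append((line_index, curr))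
--
--         # two-word repetition
--         index = 0
--         while index < len(split_line) - 3:
--             curr = split_line[index] + " " + split_line[index+1]
--             next_line = split_line[index+2] + " " + split_line[index+3]
--             if curr == next_line:
--                 duplicates.append((line_index, curr))
--                 index += 2
--                 continue
--             else:
--                 index += 1
--
--         # three-word repetition
--         index = 0
--         while index < len(split_line) - 5:
--             curr = split_line[index] + " " + split_line[index+1] + " " + split_line[index+2]
--             next_line = split_line[index+3] + " " + split_line[index+4] + " " + split_line[index+5]
--             if curr == next_line:
--                 duplicates.append((line_index, curr))
--                 index += 3
--             else:
--                 index += 1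
--
--     duplicates = list(set(duplicates))
--     duplicates.sort(key = lambda x: x[0])
--     return input_str, duplicates
-- ===== SOURCE B (Python) =====
-- def _scan(words, n):
--     """Recursive greedy scan: emit the repeated n-word phrase at the head of
--     the suffix and drop n words, otherwise drop one word and continue."""
--     if len(words) < 2 * n:
--         return []
--     phrase = ' '.join(words[:n])
--     if phrase == ' '.join(words[n:2 * n]):
--         return [phrase] + _scan(words[n:], n)
--     return _scan(words[1:], n)
--
--
-- def find_repetition(input_str):
--     """Same result as A on the stated domain: phrases are collected and
--     deduplicated per line (first occurrence), and the output is assembled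
--     line by line in order, so no global set and no final sort are needed."""
--     duplicates = []
--     for i, line in enumerate(input_str.split('\n')):
--         words = line.split(' ')
--         seen = []
--         for n in (1, 2, 3):
--             for p in _scan(words, n):
--                 if p not in seen:
--                     seen.append(p)
--         duplicates += [(i, p) for p in seen]
--     return input_str, duplicates
-- ===== Notes on version B (the rewrite author's own statement) =====
-- stated objective: alternative
-- what changed: A's three index-driven per-line passes followed by a global set-dedup and a final stable sort are replaced by a recursive greedy scan over list suffixes (no indices) whose phrases are deduplicated per line with an ordered seen-list, the output being assembled line by line in increasing order so no set and no sort exist at all.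
-- outside the precondition, e.g. on find_repetition('    '): A returns ('    ', [(0, ' '), (0, '')]), B returns ('    ', [(0, ''), (0, ' ')])
import Mathlib
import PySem

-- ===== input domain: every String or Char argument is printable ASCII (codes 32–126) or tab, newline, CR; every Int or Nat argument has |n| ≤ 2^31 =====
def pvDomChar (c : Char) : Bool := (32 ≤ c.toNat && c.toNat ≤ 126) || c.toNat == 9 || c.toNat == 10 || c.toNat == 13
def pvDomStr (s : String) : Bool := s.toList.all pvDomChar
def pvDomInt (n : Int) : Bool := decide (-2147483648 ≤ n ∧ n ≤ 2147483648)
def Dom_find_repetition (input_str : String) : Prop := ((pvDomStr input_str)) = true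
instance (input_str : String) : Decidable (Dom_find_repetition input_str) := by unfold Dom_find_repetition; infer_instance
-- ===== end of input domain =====

-- B replaces A's three index-driven per-line passes + global set + final sort by a
-- recursive greedy scan over list suffixes with a per-line ordered dedup, assembling
-- the output line by line so no global set and no sort occur; return value only.

-- ===== PORT A =====
-- one-word repetition pass: for index in range(len(split_line) - 1)
def loopA1 (li : Int) (w : List String) : List (Int × String) :=
  (PySem.List.pyRange 0 ((w.length : Int) - 1)).foldl (fun acc index =>
    if PySem.List.pyGetD w index "" = PySem.List.pyGetD w (index + 1) "" then
      acc ++ [(li, PySem.List.pyGetD w index "")]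
    else acc) []

-- two-word repetition pass: while index < len(split_line) - 3
-- (fuel is a totality guard only; each iteration moves index forward, so fuel = len(w) suffices)
def loopA2 (li : Int) (w : List String) : Nat → Nat → List (Int × String)
  | 0, _ => []
  | fuel + 1, index =>
    if index + 3 < w.length then
      if PySem.List.pyGetD w (index : Int) "" ++ " " ++ PySem.List.pyGetD w ((index : Int) + 1) ""
          = PySem.List.pyGetD w ((index : Int) + 2) "" ++ " " ++ PySem.List.pyGetD w ((index : Int) + 3) "" then
        (li, PySem.List.pyGetD w (index : Int) "" ++ " " ++ PySem.List.pyGetD w ((index : Int) + 1) "") :: loopA2 li w fuel (index + 2)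
      else loopA2 li w fuel (index + 1)
    else []

-- three-word repetition pass: while index < len(split_line) - 5
def loopA3 (li : Int) (w : List String) : Nat → Nat → List (Int × String)
  | 0, _ => []
  | fuel + 1, index =>
    if index + 5 < w.length then
      if PySem.List.pyGetD w (index : Int) "" ++ " " ++ PySem.List.pyGetD w ((index : Int) + 1) "" ++ " " ++ PySem.List.pyGetD w ((index : Int) + 2) ""
          = PySem.List.pyGetD w ((index : Int) + 3) "" ++ " " ++ PySem.List.pyGetD w ((index : Int) + 4) "" ++ " " ++ PySem.List.pyGetD w ((index : Int) + 5) "" then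
        (li, PySem.List.pyGetD w (index : Int) "" ++ " " ++ PySem.List.pyGetD w ((index : Int) + 1) "" ++ " " ++ PySem.List.pyGetD w ((index : Int) + 2) "") :: loopA3 li w fuel (index + 3)
      else loopA3 li w fuel (index + 1)
    else []

-- Python's list(set(...)) iteration order is hash order and is NOT modelled; the port
-- commits to first-occurrence order (PySem.Set.ofList). Inside Pre_ (at most one distinct
-- repeated phrase per line) the final stable sort by line index makes the result
-- independent of that order, so the port is exact there.
def find_repetition (input_str : String) : String × (List (Int × String)) :=
  (input_str, PySem.List.sorted (PySem.Set.ofList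
    ((PySem.List.enumerate ((PySem.Str.split? input_str "\n").getD [])).foldl (fun acc p =>
      ((acc ++ loopA1 p.1 ((PySem.Str.split? p.2 " ").getD []))
          ++ loopA2 p.1 ((PySem.Str.split? p.2 " ").getD []) ((PySem.Str.split? p.2 " ").getD []).length 0)
        ++ loopA3 p.1 ((PySem.Str.split? p.2 " ").getD []) ((PySem.Str.split? p.2 " ").getD []).length 0) []))
    (fun x => x.1))

-- ===== PORT B =====
-- Source B's _scan: recursive greedy scan over the word-list suffix; emits the repeated
-- n-word phrase at the head and drops n words, else drops one word and continues.
-- (fuel is a totality guard only; each call strictly shortens the list for n ≥ 1,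
-- so fuel = len(words) + 1 suffices at every call site.)
def scanAlt : Nat → List String → Nat → List String
  | 0, _, _ => []
  | fuel + 1, w, n =>
    if w.length < 2 * n then []
    else
      if PySem.Str.join " " (PySem.List.slice w none (some (n : Int)))
          = PySem.Str.join " " (PySem.List.slice w (some (n : Int)) (some (2 * (n : Int)))) then
        PySem.Str.join " " (PySem.List.slice w none (some (n : Int)))
          :: scanAlt fuel (PySem.List.slice w (some (n : Int)) none) n
      else scanAlt fuel (PySem.List.slice w (some (1 : Int)) none) n

-- per-line ordered dedup: 'if p not in seen: seen.append(p)' is PySem.Set.add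
def lineSeen (w : List String) : List String :=
  ([1, 2, 3] : List Nat).foldl
    (fun seen n => (scanAlt (w.length + 1) w n).foldl (fun s p => PySem.Set.add s p) seen) []

def find_repetition_alt (input_str : String) : String × (List (Int × String)) :=
  (input_str,
    (PySem.List.enumerate ((PySem.Str.split? input_str "\n").getD [])).foldl
      (fun acc p => acc ++ (lineSeen ((PySem.Str.split? p.2 " ").getD [])).map (fun q => (p.1, q))) [])

-- ===== PRECONDITION & SPEC =====
def pvWords (line : String) : List String := (PySem.Str.split? line " ").getD []
def pvPhrase (w : List String) (n i : Nat) : String := PySem.Str.join " " ((w.drop i).take n)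
def pvMatchAt (w : List String) (n i : Nat) : Prop :=
  i + 2 * n ≤ w.length ∧ pvPhrase w n i = pvPhrase w n (i + n)

-- Pre_ excludes inputs where some line carries two adjacent-repetition windows (sizes 1-3)
-- whose repeated phrases differ: there A's list(set(...)) order among tuples with the same
-- line index is hash-dependent (an accident of CPython's set, not a specified value).
def Pre_find_repetition (input_str : String) : Prop :=
  ∀ line ∈ (PySem.Str.split? input_str "\n").getD [],
    ∀ n ∈ ([1, 2, 3] : List Nat), ∀ m ∈ ([1, 2, 3] : List Nat),
      ∀ i < (pvWords line).length, ∀ j < (pvWords line).length,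
        pvMatchAt (pvWords line) n i → pvMatchAt (pvWords line) m j →
          pvPhrase (pvWords line) n i = pvPhrase (pvWords line) m j

instance (input_str : String) : Decidable (Pre_find_repetition input_str) := by
  unfold Pre_find_repetition pvMatchAt; infer_instance

def pvWitness_find_repetition : String := "go go north"

def Spec_find_repetition (input_str : String) (out : String × (List (Int × String))) : Prop := out = find_repetition_alt input_str
instance (input_str : String) (out : String × (List (Int × String))) : Decidable (Spec_find_repetition input_str out) := by unfold Spec_find_repetition; infer_instance

-- ===== CLAIM (what is proved, stated in full; the proofs are below) =====
def Claim_equal_find_repetition : Prop := ∀ (input_str : String), Dom_find_repetition input_str → Pre_find_repetition input_str → Spec_find_repetition input_str (find_repetition input_str)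

-- ===== LEMMAS AND PROOFS =====

-- proof-side common abstraction: the greedy window scan on indices, recording tuples
def scanB (li : Int) (w : List String) (n : Nat) : Nat → Nat → List (Int × String)
  | 0, _ => []
  | fuel + 1, i =>
    if i + 2 * n ≤ w.length then
      if pvPhrase w n i = pvPhrase w n (i + n) then
        (li, pvPhrase w n i) :: scanB li w n fuel (i + n)
      else scanB li w n fuel (i + 1)
    else []

-- join of a one/two/three-word window, as the explicit concatenations A builds
theorem pv_jn1 (a : String) : PySem.Str.join " " [a] = a := by
  apply String.toList_inj.mp
  simp [PySem.Str.toList_join, PySem.Chars.join_singleton]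

theorem pv_jn2 (a b : String) : PySem.Str.join " " [a, b] = a ++ " " ++ b := by
  apply String.toList_inj.mp
  simp [PySem.Str.toList_join, PySem.Chars.join_cons_cons, PySem.Chars.join_singleton,
    String.toList_append]

theorem pv_jn3 (a b c : String) : PySem.Str.join " " [a, b, c] = a ++ " " ++ b ++ " " ++ c := by
  apply String.toList_inj.mp
  simp [PySem.Str.toList_join, PySem.Chars.join_cons_cons, PySem.Chars.join_singleton,
    String.toList_append]

theorem pv_win1 (w : List String) (i : Nat) (h : i + 1 ≤ w.length) :
    (w.drop i).take 1 = [w.getD i ""] := by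
  rw [List.drop_eq_getElem_cons (show i < w.length by omega),
    show (1 : Nat) = 0 + 1 from rfl, List.take_succ_cons, List.take_zero,
    List.getD_eq_getElem w "" (show i < w.length by omega)]

theorem pv_win2 (w : List String) (i : Nat) (h : i + 2 ≤ w.length) :
    (w.drop i).take 2 = [w.getD i "", w.getD (i+1) ""] := by
  rw [List.drop_eq_getElem_cons (show i < w.length by omega),
    List.drop_eq_getElem_cons (show i + 1 < w.length by omega),
    show (2 : Nat) = 0 + 1 + 1 from rfl, List.take_succ_cons, List.take_succ_cons, List.take_zero,
    List.getD_eq_getElem w "" (show i < w.length by omega),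
    List.getD_eq_getElem w "" (show i + 1 < w.length by omega)]

theorem pv_win3 (w : List String) (i : Nat) (h : i + 3 ≤ w.length) :
    (w.drop i).take 3 = [w.getD i "", w.getD (i+1) "", w.getD (i+2) ""] := by
  rw [List.drop_eq_getElem_cons (show i < w.length by omega),
    List.drop_eq_getElem_cons (show i + 1 < w.length by omega),
    List.drop_eq_getElem_cons (show i + 2 < w.length by omega),
    show (3 : Nat) = 0 + 1 + 1 + 1 from rfl, List.take_succ_cons, List.take_succ_cons,
    List.take_succ_cons, List.take_zero,
    List.getD_eq_getElem w "" (show i < w.length by omega),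
    List.getD_eq_getElem w "" (show i + 1 < w.length by omega),
    List.getD_eq_getElem w "" (show i + 2 < w.length by omega)]

theorem pv_ph1 (w : List String) (i : Nat) (h : i + 1 ≤ w.length) :
    pvPhrase w 1 i = PySem.List.pyGetD w (i : Int) "" := by
  unfold pvPhrase
  rw [pv_win1 w i h, pv_jn1, PySem.List.pyGetD_natCast]

theorem pv_ph2 (w : List String) (i : Nat) (h : i + 2 ≤ w.length) :
    pvPhrase w 2 i = PySem.List.pyGetD w (i : Int) "" ++ " " ++ PySem.List.pyGetD w ((i : Int) + 1) "" := by
  have h1 : ((i : Int) + 1) = ((i + 1 : Nat) : Int) := by push_cast; ring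
  unfold pvPhrase
  rw [pv_win2 w i h, pv_jn2, h1, PySem.List.pyGetD_natCast, PySem.List.pyGetD_natCast]

theorem pv_ph3 (w : List String) (i : Nat) (h : i + 3 ≤ w.length) :
    pvPhrase w 3 i = PySem.List.pyGetD w (i : Int) "" ++ " " ++ PySem.List.pyGetD w ((i : Int) + 1) "" ++ " " ++ PySem.List.pyGetD w ((i : Int) + 2) "" := by
  have h1 : ((i : Int) + 1) = ((i + 1 : Nat) : Int) := by push_cast; ring
  have h2 : ((i : Int) + 2) = ((i + 2 : Nat) : Int) := by push_cast; ring
  unfold pvPhrase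
  rw [pv_win3 w i h, pv_jn3, h1, h2, PySem.List.pyGetD_natCast, PySem.List.pyGetD_natCast,
    PySem.List.pyGetD_natCast]

-- scanB records only matched windows
theorem pv_mem_scanB (li : Int) (w : List String) (n : Nat) (x : Int × String) :
    ∀ fuel i, x ∈ scanB li w n fuel i → ∃ k, pvMatchAt w n k ∧ x = (li, pvPhrase w n k) := by
  intro fuel
  induction fuel with
  | zero => intro i hx; simp [scanB] at hx
  | succ f ih =>
    intro i hx
    rw [scanB] at hx
    by_cases hg : i + 2 * n ≤ w.length
    · rw [if_pos hg] at hx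
      by_cases hc : pvPhrase w n i = pvPhrase w n (i + n)
      · rw [if_pos hc] at hx
        rcases List.mem_cons.mp hx with h1 | h1
        · exact ⟨i, ⟨hg, hc⟩, h1⟩
        · exact ih (i + n) h1
      · rw [if_neg hc] at hx
        exact ih (i + 1) hx
    · rw [if_neg hg] at hx
      simp at hx

-- A's one-word for-loop is the n = 1 instance of the scan
theorem pv_loopA1_aux (li : Int) (w : List String) :
    ∀ fuel (i : Nat), w.length - i ≤ fuel → ∀ acc,
      (PySem.List.pyRange (i : Int) ((w.length : Int) - 1)).foldl (fun acc index =>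
        if PySem.List.pyGetD w index "" = PySem.List.pyGetD w (index + 1) "" then
          acc ++ [(li, PySem.List.pyGetD w index "")]
        else acc) acc
      = acc ++ scanB li w 1 fuel i := by
  intro fuel
  induction fuel with
  | zero =>
    intro i hle acc
    have hr : PySem.List.pyRange (i : Int) ((w.length : Int) - 1) = [] := by
      simp [PySem.List.pyRange]
      omega
    rw [hr]
    simp [scanB]
  | succ f ih =>
    intro i hle acc
    by_cases hlt : (i : Int) < (w.length : Int) - 1
    · rw [PySem.List.pyRange_one_cons hlt, List.foldl_cons]
      have hcast : ((i : Int) + 1) = ((i + 1 : Nat) : Int) := by push_cast; ring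
      rw [hcast, ih (i + 1) (by omega)]
      rw [scanB]
      rw [if_pos (show i + 2 * 1 ≤ w.length by omega)]
      rw [show pvPhrase w 1 i = PySem.List.pyGetD w (i : Int) "" from pv_ph1 w i (by omega),
        show pvPhrase w 1 (i + 1) = PySem.List.pyGetD w ((i + 1 : Nat) : Int) "" from pv_ph1 w (i + 1) (by omega),
        ← hcast]
      split_ifs <;> simp
    · have hr : PySem.List.pyRange (i : Int) ((w.length : Int) - 1) = [] := by
        simp [PySem.List.pyRange]
        omega
      rw [hr, scanB, if_neg (show ¬ i + 2 * 1 ≤ w.length by omega)]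
      simp

theorem pv_loopA1_eq (li : Int) (w : List String) : loopA1 li w = scanB li w 1 w.length 0 := by
  have := pv_loopA1_aux li w w.length 0 (by omega) []
  simpa [loopA1] using this

-- A's two-word while-loop is the n = 2 instance of the scan
theorem pv_loopA2_eq (li : Int) (w : List String) :
    ∀ fuel i, loopA2 li w fuel i = scanB li w 2 fuel i := by
  intro fuel
  induction fuel with
  | zero => intro i; rfl
  | succ f ih =>
    intro i
    rw [loopA2, scanB]
    by_cases hg : i + 3 < w.length
    · rw [if_pos hg, if_pos (show i + 2 * 2 ≤ w.length by omega)]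
      have e2 : ((i + 2 : Nat) : Int) = (i : Int) + 2 := by push_cast; ring
      have e3 : ((i + 2 : Nat) : Int) + 1 = (i : Int) + 3 := by push_cast; ring
      rw [pv_ph2 w i (by omega), pv_ph2 w (i + 2) (by omega), e3, e2, ih (i + 2), ih (i + 1)]
    · rw [if_neg hg, if_neg (show ¬ i + 2 * 2 ≤ w.length by omega)]

-- A's three-word while-loop is the n = 3 instance of the scan
theorem pv_loopA3_eq (li : Int) (w : List String) :
    ∀ fuel i, loopA3 li w fuel i = scanB li w 3 fuel i := by
  intro fuel
  induction fuel with
  | zero => intro i; rfl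
  | succ f ih =>
    intro i
    rw [loopA3, scanB]
    by_cases hg : i + 5 < w.length
    · rw [if_pos hg, if_pos (show i + 2 * 3 ≤ w.length by omega)]
      have e3 : ((i + 3 : Nat) : Int) = (i : Int) + 3 := by push_cast; ring
      have e4 : ((i + 3 : Nat) : Int) + 1 = (i : Int) + 4 := by push_cast; ring
      have e5 : ((i + 3 : Nat) : Int) + 2 = (i : Int) + 5 := by push_cast; ring
      rw [pv_ph3 w i (by omega), pv_ph3 w (i + 3) (by omega), e5, e4, e3, ih (i + 3), ih (i + 1)]
    · rw [if_neg hg, if_neg (show ¬ i + 2 * 3 ≤ w.length by omega)]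

-- fuel irrelevance of the scan once the fuel covers the remaining suffix
theorem pv_scanB_ext (li : Int) (w : List String) (n : Nat) (hn : 1 ≤ n) :
    ∀ fuel fuel' i, w.length ≤ fuel + i → w.length ≤ fuel' + i →
      scanB li w n fuel i = scanB li w n fuel' i := by
  intro fuel
  induction fuel with
  | zero =>
    intro fuel' i h1 h2
    cases fuel' with
    | zero => rfl
    | succ f' =>
      rw [scanB, scanB, if_neg (show ¬ i + 2 * n ≤ w.length by omega)]
  | succ f ih =>
    intro fuel' i h1 h2
    cases fuel' with
    | zero =>
      rw [scanB, scanB, if_neg (show ¬ i + 2 * n ≤ w.length by omega)]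
    | succ f' =>
      rw [scanB, scanB]
      by_cases hg : i + 2 * n ≤ w.length
      · rw [if_pos hg, if_pos hg]
        by_cases hc : pvPhrase w n i = pvPhrase w n (i + n)
        · rw [if_pos hc, if_pos hc, ih f' (i + n) (by omega) (by omega)]
        · rw [if_neg hc, if_neg hc, ih f' (i + 1) (by omega) (by omega)]
      · rw [if_neg hg, if_neg hg]

-- B's recursive suffix scan computes the index scan's phrases
theorem pv_scanAlt_eq (li : Int) (w : List String) (n : Nat) (hn : 1 ≤ n) :
    ∀ fuel i, scanB li w n fuel i = (scanAlt fuel (w.drop i) n).map (fun q => (li, q)) := by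
  intro fuel
  induction fuel with
  | zero => intro i; rfl
  | succ f ih =>
    intro i
    have hc2 : (2 * (n : Int)) = ((2 * n : Nat) : Int) := by push_cast; ring
    rw [scanB, scanAlt, hc2, PySem.List.slice_to_natCast, PySem.List.slice_natCast,
      PySem.List.slice_from_natCast, PySem.List.slice_from_one, List.length_drop]
    by_cases hg : i + 2 * n ≤ w.length
    · rw [if_neg (show ¬ w.length - i < 2 * n by omega)]
      have hd : (w.drop i).drop n = w.drop (i + n) := by
        rw [List.drop_drop]
      have hd1 : (w.drop i).tail = w.drop (i + 1) := by
        rw [List.tail_drop]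
      have he : ((w.drop i).drop n).take (2 * n - n) = (w.drop (i + n)).take n := by
        rw [hd, show 2 * n - n = n by omega]
      rw [if_pos hg, he, hd, hd1]
      simp only [pvPhrase]
      by_cases hc : PySem.Str.join " " ((w.drop i).take n)
          = PySem.Str.join " " ((w.drop (i + n)).take n)
      · rw [if_pos hc, if_pos hc, List.map_cons, ih (i + n)]
      · rw [if_neg hc, if_neg hc, ih (i + 1)]
    · rw [if_neg hg, if_pos (show w.length - i < 2 * n by omega)]
      rfl

-- A's accumulator loop with three appends per step, as one flatMap
theorem pv_foldl3 {α β : Type} (l : List α) (f g h : α → List β) :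
    ∀ acc, l.foldl (fun acc x => ((acc ++ f x) ++ g x) ++ h x) acc
      = acc ++ l.flatMap (fun x => f x ++ (g x ++ h x)) := by
  induction l with
  | nil => intro acc; simp
  | cons a t ih =>
    intro acc
    rw [List.foldl_cons, ih, List.flatMap_cons]
    simp [List.append_assoc]

-- folding Set.add over elements disjoint from a prefix leaves the prefix in place
theorem pv_foldl_add {α : Type} [BEq α] [LawfulBEq α] (ys : List α) :
    ∀ (s t : List α), (∀ y ∈ ys, y ∉ s) →
      ys.foldl (fun acc x => PySem.Set.add acc x) (s ++ t)
        = s ++ ys.foldl (fun acc x => PySem.Set.add acc x) t := by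
  induction ys with
  | nil => intro s t _; rfl
  | cons y ys' ih =>
    intro s t hd
    rw [List.foldl_cons, List.foldl_cons, PySem.Set.add_eq_ite, PySem.Set.add_eq_ite]
    have hys : y ∉ s := hd y (List.mem_cons_self)
    by_cases hyt : y ∈ t
    · rw [if_pos (List.mem_append.mpr (Or.inr hyt)), if_pos hyt]
      exact ih s t (fun z hz => hd z (List.mem_cons_of_mem _ hz))
    · rw [if_neg (fun hm => (List.mem_append.mp hm).elim hys hyt), if_neg hyt,
        List.append_assoc]
      exact ih s (t ++ [y]) (fun z hz => hd z (List.mem_cons_of_mem _ hz))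

theorem pv_ofList_append {α : Type} [BEq α] [LawfulBEq α] (xs ys : List α)
    (hd : ∀ y ∈ ys, y ∉ xs) :
    PySem.Set.ofList (xs ++ ys) = PySem.Set.ofList xs ++ PySem.Set.ofList ys := by
  rw [PySem.Set.ofList_eq_foldl, PySem.Set.ofList_eq_foldl, PySem.Set.ofList_eq_foldl,
    List.foldl_append]
  have hd' : ∀ y ∈ ys, y ∉ xs.foldl (fun acc x => PySem.Set.add acc x) [] := by
    intro y hy hmem
    exact hd y hy ((PySem.Set.mem_ofList _ _).mp (by rw [PySem.Set.ofList_eq_foldl]; exact hmem))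
  have := pv_foldl_add ys (xs.foldl (fun acc x => PySem.Set.add acc x) []) [] hd'
  simpa using this

-- ofList commutes with an injective map
theorem pv_ofList_map {α β : Type} [BEq α] [LawfulBEq α] [BEq β] [LawfulBEq β] (f : α → β)
    (hf : ∀ a b, f a = f b → a = b) (l : List α) :
    PySem.Set.ofList (l.map f) = (PySem.Set.ofList l).map f := by
  rw [PySem.Set.ofList_eq_foldl, PySem.Set.ofList_eq_foldl]
  have aux : ∀ (l' : List α) (s : List α),
      (l'.map f).foldl (fun acc x => PySem.Set.add acc x) (s.map f)
        = (l'.foldl (fun acc x => PySem.Set.add acc x) s).map f := by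
    intro l'
    induction l' with
    | nil => intro s; rfl
    | cons a t ih =>
      intro s
      rw [List.map_cons, List.foldl_cons, List.foldl_cons, PySem.Set.add_eq_ite,
        PySem.Set.add_eq_ite]
      have hmem : f a ∈ s.map f ↔ a ∈ s := by
        constructor
        · intro hm
          obtain ⟨b, hb, hba⟩ := List.mem_map.mp hm
          exact (hf b a hba) ▸ hb
        · intro hm; exact List.mem_map.mpr ⟨a, hm, rfl⟩
      by_cases hs : a ∈ s
      · rw [if_pos (hmem.mpr hs), if_pos hs, ih s]
      · rw [if_neg (fun hm => hs (hmem.mp hm)), if_neg hs,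
          show List.map f s ++ [f a] = List.map f (s ++ [a]) by simp, ih (s ++ [a])]
  simpa using aux l []

-- folding Set.add with elements already present is the identity
theorem pv_foldl_add_mem {α : Type} [BEq α] [LawfulBEq α] (ys : List α) :
    ∀ s : List α, (∀ y ∈ ys, y ∈ s) →
      ys.foldl (fun acc x => PySem.Set.add acc x) s = s := by
  induction ys with
  | nil => intro s _; rfl
  | cons y ys' ih =>
    intro s hd
    rw [List.foldl_cons, PySem.Set.add_of_mem (hd y List.mem_cons_self)]
    exact ih s (fun z hz => hd z (List.mem_cons_of_mem _ hz))

-- a list whose elements are all equal dedups to [] or a singleton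
theorem pv_ofList_const {α : Type} [BEq α] [LawfulBEq α] (l : List α)
    (h : ∀ a ∈ l, ∀ b ∈ l, a = b) :
    PySem.Set.ofList l = [] ∨ ∃ p, PySem.Set.ofList l = [p] := by
  cases l with
  | nil => exact Or.inl rfl
  | cons x xs =>
    refine Or.inr ⟨x, ?_⟩
    rw [PySem.Set.ofList_eq_foldl, List.foldl_cons]
    have hx : PySem.Set.add [] x = [x] := rfl
    rw [hx]
    exact pv_foldl_add_mem xs [x] (fun y hy => by
      rw [h y (List.mem_cons_of_mem _ hy) x List.mem_cons_self]; exact List.mem_cons_self)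

-- every tuple produced from enumerate starting at s' has line index ≥ s'
theorem pv_fst_ge (G : String → List String) (t : List String) (s' : Int) (y : Int × String)
    (hy : y ∈ (PySem.List.enumerate t s').flatMap (fun p => (G p.2).map (fun q => (p.1, q)))) :
    s' ≤ y.1 := by
  obtain ⟨p, hp, hy2⟩ := List.mem_flatMap.mp hy
  obtain ⟨k, hk, hpk⟩ := (PySem.List.mem_enumerate_iff t s' p).mp hp
  obtain ⟨q, _, hq⟩ := List.mem_map.mp hy2
  rw [← hq, hpk]
  simp

-- global first-occurrence dedup of per-line segments with distinct line indices
-- is the concatenation of the per-line dedups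
theorem pv_ofList_flat (G : String → List String) (lines : List String) :
    ∀ s : Int,
      PySem.Set.ofList ((PySem.List.enumerate lines s).flatMap
          (fun p => (G p.2).map (fun q => (p.1, q))))
        = (PySem.List.enumerate lines s).flatMap
            (fun p => (PySem.Set.ofList (G p.2)).map (fun q => (p.1, q))) := by
  induction lines with
  | nil => intro s; rfl
  | cons a t ih =>
    intro s
    rw [PySem.List.enumerate_cons, List.flatMap_cons, List.flatMap_cons]
    simp only []
    have hd : ∀ y ∈ (PySem.List.enumerate t (s + 1)).flatMap
        (fun p => (G p.2).map (fun q => (p.1, q))), y ∉ (G a).map (fun q => (s, q)) := by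
      intro y hy hmem
      have h1 := pv_fst_ge G t (s + 1) y hy
      obtain ⟨q, _, hq⟩ := List.mem_map.mp hmem
      rw [← hq] at h1
      simp at h1
    rw [pv_ofList_append _ _ hd, ih (s + 1),
      pv_ofList_map (fun q => ((s : Int), q)) (fun u v huv => by
        simpa using congrArg Prod.snd huv) (G a)]

-- strict increase of line indices across the assembled output, given that each
-- line's dedup is [] or a singleton
theorem pv_pairwise (G : String → List String) (lines : List String)
    (hlen : ∀ line ∈ lines, ∀ a ∈ G line, ∀ b ∈ G line, a = b) :
    ∀ s : Int,
      ((PySem.List.enumerate lines s).flatMap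
          (fun p => (PySem.Set.ofList (G p.2)).map (fun q => (p.1, q)))).Pairwise
        (fun x y => x.1 < y.1) := by
  induction lines with
  | nil => intro s; simp
  | cons a t ih =>
    intro s
    rw [PySem.List.enumerate_cons, List.flatMap_cons]
    simp only []
    apply List.pairwise_append.mpr
    refine ⟨?_, ih (fun l hl => hlen l (List.mem_cons_of_mem _ hl)) (s + 1), ?_⟩
    · rcases pv_ofList_const (G a) (hlen a List.mem_cons_self) with h | ⟨p, h⟩
      · rw [h]; simp
      · rw [h]; simp
    · intro x hx y hy
      obtain ⟨q, _, hq⟩ := List.mem_map.mp hx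
      have h1 : s + 1 ≤ y.1 := by
        refine le_trans ?_ (pv_fst_ge (fun line => PySem.Set.ofList (G line)) t (s + 1) y hy)
        omega
      rw [← hq]
      simp
      omega

-- the per-line phrase pool B deduplicates (proof-side name)
def pvG (line : String) : List String :=
  scanAlt ((pvWords line).length + 1) (pvWords line) 1
    ++ (scanAlt ((pvWords line).length + 1) (pvWords line) 2
        ++ scanAlt ((pvWords line).length + 1) (pvWords line) 3)

theorem pv_lineSeen (line : String) : lineSeen (pvWords line) = PySem.Set.ofList (pvG line) := by
  rw [lineSeen, pvG, PySem.Set.ofList_eq_foldl]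
  simp only [List.foldl_cons, List.foldl_nil, List.foldl_append]

-- members of B's scan are matched phrases
theorem pv_mem_scanAlt (w : List String) (n : Nat) (hn : 1 ≤ n) (x : String)
    (hx : x ∈ scanAlt (w.length + 1) w n) :
    ∃ k, pvMatchAt w n k ∧ x = pvPhrase w n k := by
  have h := pv_scanAlt_eq 0 w n hn (w.length + 1) 0
  rw [List.drop_zero] at h
  have hmem : ((0 : Int), x) ∈ scanB 0 w n (w.length + 1) 0 := by
    rw [h]
    exact List.mem_map.mpr ⟨x, hx, rfl⟩
  obtain ⟨k, hk, he⟩ := pv_mem_scanB 0 w n _ _ _ hmem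
  exact ⟨k, hk, congrArg Prod.snd he⟩

-- under Pre_, all phrases pooled for one line are equal
theorem pv_G_const (line : String)
    (hp : ∀ n ∈ ([1, 2, 3] : List Nat), ∀ m ∈ ([1, 2, 3] : List Nat),
      ∀ i < (pvWords line).length, ∀ j < (pvWords line).length,
        pvMatchAt (pvWords line) n i → pvMatchAt (pvWords line) m j →
          pvPhrase (pvWords line) n i = pvPhrase (pvWords line) m j) :
    ∀ a ∈ pvG line, ∀ b ∈ pvG line, a = b := by
  have hchar : ∀ a ∈ pvG line, ∃ (n k : Nat), n ∈ ([1, 2, 3] : List Nat) ∧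
      pvMatchAt (pvWords line) n k ∧ a = pvPhrase (pvWords line) n k := by
    intro a ha
    rw [pvG] at ha
    rcases List.mem_append.mp ha with h1 | h23
    · obtain ⟨k, hk, he⟩ := pv_mem_scanAlt _ 1 (by omega) a h1
      exact ⟨1, k, by simp, hk, he⟩
    · rcases List.mem_append.mp h23 with h2 | h3
      · obtain ⟨k, hk, he⟩ := pv_mem_scanAlt _ 2 (by omega) a h2
        exact ⟨2, k, by simp, hk, he⟩
      · obtain ⟨k, hk, he⟩ := pv_mem_scanAlt _ 3 (by omega) a h3
        exact ⟨3, k, by simp, hk, he⟩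
  intro a ha b hb
  obtain ⟨n, i, hn, hmi, hai⟩ := hchar a ha
  obtain ⟨m, j, hm, hmj, hbj⟩ := hchar b hb
  have hn1 : 1 ≤ n := by have h := hn; simp at h; omega
  have hm1 : 1 ≤ m := by have h := hm; simp at h; omega
  have := hp n hn m hm i (by have := hmi.1; omega) j (by have := hmj.1; omega) hmi hmj
  rw [hai, hbj, this]

-- ===== VERDICT =====
theorem find_repetition_spec : Claim_equal_find_repetition := by
  intro input _dom hpre
  unfold Spec_find_repetition find_repetition find_repetition_alt
  simp only [Prod.mk.injEq]
  refine ⟨trivial, ?_⟩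
  rw [pv_foldl3]
  simp only [pv_loopA1_eq, pv_loopA2_eq, pv_loopA3_eq, PySem.List.foldl_append_eq_flatMap,
    List.nil_append]
  simp only [show ∀ line, (PySem.Str.split? line " ").getD [] = pvWords line from fun _ => rfl]
  have hsc : ∀ (li : Int) (w : List String) (n : Nat), 1 ≤ n →
      scanB li w n w.length 0 = (scanAlt (w.length + 1) w n).map (fun q => (li, q)) := by
    intro li w n hn
    rw [pv_scanB_ext li w n hn w.length (w.length + 1) 0 (by omega) (by omega),
      pv_scanAlt_eq li w n hn (w.length + 1) 0, List.drop_zero]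
  simp only [hsc _ _ 1 (by omega), hsc _ _ 2 (by omega), hsc _ _ 3 (by omega),
    ← List.map_append]
  simp only [show ∀ (p : Int × String),
      scanAlt ((pvWords p.2).length + 1) (pvWords p.2) 1
        ++ (scanAlt ((pvWords p.2).length + 1) (pvWords p.2) 2
            ++ scanAlt ((pvWords p.2).length + 1) (pvWords p.2) 3) = pvG p.2
      from fun _ => rfl]
  simp only [pv_lineSeen]
  rw [pv_ofList_flat]
  exact PySem.List.sorted_eq_of_perm_of_pairwise_lt _ _ _ (List.Perm.refl _)
    (pv_pairwise pvG _ (fun line hl => pv_G_const line (hpre line hl)) 0)
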